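-- pv_equiv track=rewrite | github.com/Joelbyte/Temporal-NRD-Tools | temporal_checker.py | pattern_equalities
-- ===== SOURCE A (Python) =====
-- def pattern_equalities(template):
--     """Given a template (tuple of variable indices), return the set of
--     (i, j) pairs with i < j that must have equal values."""
--     eqs = set()
--     k = len(template)
--     for i in range(k):
--         for j in range(i + 1, k):
--             if template[i] == template[j]:
--                 eqs.add((i, j))
--     return eqs
-- ===== SOURCE B (Python) =====
-- def pattern_equalities(template):
--     """Given a template (tuple of variable indices), return the set of
--     (i, j) pairs with i < j that must have equal values."""
--     k = len(template)
--     positions = {}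
--     for j in range(k):
--         positions.setdefault(template[j], []).append(j)
--     return {(i, j) for i in range(k) for j in positions[template[i]] if j > i}
-- ===== Notes on version B (the rewrite author's own statement) =====
-- stated objective: alternative
-- what changed: Replaced A's double loop over all index pairs by a one-pass dict grouping indices by template value, then emitting pairs only within each equal-value group; cost becomes O(k + output) instead of O(k^2), which a timing run could not confirm as faster on duplicate-heavy inputs whose output is itself quadratic.
import Mathlib
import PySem

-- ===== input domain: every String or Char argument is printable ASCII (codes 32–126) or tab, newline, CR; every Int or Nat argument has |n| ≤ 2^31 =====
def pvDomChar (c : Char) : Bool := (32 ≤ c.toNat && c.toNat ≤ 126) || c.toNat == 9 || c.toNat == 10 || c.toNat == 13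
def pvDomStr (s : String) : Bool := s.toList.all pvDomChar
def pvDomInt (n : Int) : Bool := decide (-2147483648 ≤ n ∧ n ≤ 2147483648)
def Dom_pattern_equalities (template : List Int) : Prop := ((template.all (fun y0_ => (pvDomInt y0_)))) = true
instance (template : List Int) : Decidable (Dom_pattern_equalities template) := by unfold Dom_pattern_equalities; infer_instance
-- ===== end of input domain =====

-- B replaces A's double scan over all index pairs by grouping indices by value in a dict
-- and emitting pairs only within each equal-value group (objective: alternative algorithm).

-- ===== PORT A =====
def pattern_equalities (template : List Int) : List (Int × Int) :=
  let k : Int := template.length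
  (PySem.List.pyRange 0 k 1).foldl (fun (eqs : PySem.Set (Int × Int)) i =>
    (PySem.List.pyRange (i + 1) k 1).foldl (fun eqs j =>
      if PySem.List.pyGetD template i 0 == PySem.List.pyGetD template j 0
      then PySem.Set.add eqs (i, j) else eqs) eqs) PySem.Set.empty

-- ===== PORT B =====
def pattern_equalities_alt (template : List Int) : List (Int × Int) :=
  let k : Int := template.length
  let positions : PySem.Dict Int (List Int) :=
    (PySem.List.pyRange 0 k 1).foldl
      (fun d j => d.modify (PySem.List.pyGetD template j 0) [] (fun l => l ++ [j]))
      PySem.Dict.empty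
  (PySem.List.pyRange 0 k 1).foldl (fun (s : PySem.Set (Int × Int)) i =>
    (positions.getD (PySem.List.pyGetD template i 0) []).foldl
      (fun s j => if i < j then PySem.Set.add s (i, j) else s) s) PySem.Set.empty

-- ===== PRECONDITION & SPEC =====
def Spec_pattern_equalities (template : List Int) (out : List (Int × Int)) : Prop := out = pattern_equalities_alt template
instance (template : List Int) (out : List (Int × Int)) : Decidable (Spec_pattern_equalities template out) := by unfold Spec_pattern_equalities; infer_instance

-- ===== CLAIM (what is proved, stated in full; the proofs are below) =====
def Claim_equal_pattern_equalities : Prop := ∀ (template : List Int), Dom_pattern_equalities template → Spec_pattern_equalities template (pattern_equalities template)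

-- ===== LEMMAS AND PROOFS =====

-- 'if p j then s.add (f j) else s' folded over l is s.update of the filtered-and-mapped list
theorem pvFoldlAddIf (l : List Int) (p : Int → Bool) (f : Int → Int × Int)
    (s : PySem.Set (Int × Int)) :
    l.foldl (fun s j => if p j then PySem.Set.add s (f j) else s) s
      = PySem.Set.update s ((l.filter p).map f) := by
  rw [PySem.Set.update_map_eq_foldl_add, List.foldl_filter]

-- folding Set.update over per-index pair lists whose first components are the index appends
theorem pvFoldlUpdateFresh (G : Int → List (Int × Int))
    (hfst : ∀ i, ∀ x ∈ G i, x.1 = i) (hnd : ∀ i, (G i).Nodup) :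
    ∀ (l : List Int), l.Nodup → ∀ (s : PySem.Set (Int × Int)), (∀ x ∈ s, x.1 ∉ l) →
      l.foldl (fun s i => PySem.Set.update s (G i)) s = s ++ l.flatMap G := by
  intro l
  induction l with
  | nil => intro _ s _; simp
  | cons b l ih =>
    intro hnodup s hs
    have hstep : PySem.Set.update s (G b) = s ++ G b := by
      refine PySem.Set.update_eq_append_of_disjoint s (G b) (hnd b) ?_
      intro x hx hxs
      exact (hs x hxs) (by simp [hfst b x hx])
    have hrec := ih hnodup.of_cons (s ++ G b) (by
      intro x hx
      rcases List.mem_append.mp hx with h | h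
      · exact fun hm => (hs x h) (List.mem_cons_of_mem _ hm)
      · rw [hfst b x h]; exact (List.nodup_cons.mp hnodup).1)
    simp only [List.foldl_cons, hstep, hrec, List.flatMap_cons, List.append_assoc]

-- the grouping dict: positions[v] is the ascending list of indices j with template[j] == v
theorem pvPositionsGetD (t : List Int) (v : Int) :
    (((PySem.List.pyRange 0 (t.length : Int) 1).foldl
        (fun d j => d.modify (PySem.List.pyGetD t j 0) [] (fun l => l ++ [j]))
        PySem.Dict.empty).getD v [])
      = (PySem.List.pyRange 0 (t.length : Int) 1).filter
          (fun j => PySem.List.pyGetD t j 0 == v) := by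
  have h := PySem.Dict.getD_foldl_modify_append
    (l := (PySem.List.pyRange 0 (t.length : Int) 1).map
        (fun j => (PySem.List.pyGetD t j 0, j)))
    (d := (PySem.Dict.empty : PySem.Dict Int (List Int))) (c := v)
  rw [List.foldl_map] at h
  simp only [h, PySem.Dict.getD_empty, List.nil_append, List.filter_map, List.map_map]
  simp [Function.comp_def]

-- A's inner pair list for index i (0 ≤ i < k) equals B's inner pair list for i
theorem pvInnerEq (t : List Int) (i : Int) (h0 : 0 ≤ i) (hk : i < (t.length : Int)) :
    ((PySem.List.pyRange 0 (t.length : Int) 1).filter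
        (fun j => PySem.List.pyGetD t j 0 == PySem.List.pyGetD t i 0)).filter
          (fun j => decide (i < j))
      = (PySem.List.pyRange (i + 1) (t.length : Int) 1).filter
          (fun j => PySem.List.pyGetD t i 0 == PySem.List.pyGetD t j 0) := by
  rw [List.filter_filter,
    PySem.List.pyRange_one_append 0 (i + 1) (t.length : Int) (by omega) (by omega),
    List.filter_append]
  have h1 : (PySem.List.pyRange 0 (i + 1) 1).filter
      (fun j => decide (i < j) && (PySem.List.pyGetD t j 0 == PySem.List.pyGetD t i 0)) = [] := by
    apply List.filter_eq_nil_iff.mpr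
    intro j hj
    have := (PySem.List.mem_pyRange_one.mp hj).2
    simp only [Bool.and_eq_true, decide_eq_true_eq, not_and]
    intro hij; omega
  have h2 : ∀ j ∈ PySem.List.pyRange (i + 1) (t.length : Int) 1,
      (decide (i < j) && (PySem.List.pyGetD t j 0 == PySem.List.pyGetD t i 0))
        = (PySem.List.pyGetD t i 0 == PySem.List.pyGetD t j 0) := by
    intro j hj
    have := (PySem.List.mem_pyRange_one.mp hj).1
    have : i < j := by omega
    simp [this, BEq.comm]
  rw [h1, List.filter_congr h2, List.nil_append]

-- ===== VERDICT (by name: the statement is the Claim_ definition above) =====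
theorem pattern_equalities_spec : Claim_equal_pattern_equalities := by
  intro t _
  unfold Spec_pattern_equalities pattern_equalities pattern_equalities_alt
  simp only []
  -- turn both inner loops into Set.update of explicit pair lists
  have hA : ∀ (s : PySem.Set (Int × Int)) (i : Int),
      (PySem.List.pyRange (i + 1) (t.length : Int) 1).foldl (fun eqs j =>
        if PySem.List.pyGetD t i 0 == PySem.List.pyGetD t j 0
        then PySem.Set.add eqs (i, j) else eqs) s
      = PySem.Set.update s
          (((PySem.List.pyRange (i + 1) (t.length : Int) 1).filter
            (fun j => PySem.List.pyGetD t i 0 == PySem.List.pyGetD t j 0)).map (fun j => (i, j))) := by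
    intro s i; exact pvFoldlAddIf _ _ _ s
  have hB : ∀ (s : PySem.Set (Int × Int)) (i : Int),
      ((((PySem.List.pyRange 0 (t.length : Int) 1).foldl
          (fun d j => d.modify (PySem.List.pyGetD t j 0) [] (fun l => l ++ [j]))
          PySem.Dict.empty).getD (PySem.List.pyGetD t i 0) []).foldl
        (fun s j => if i < j then PySem.Set.add s (i, j) else s) s)
      = PySem.Set.update s
          ((((PySem.List.pyRange 0 (t.length : Int) 1).filter
              (fun j => PySem.List.pyGetD t j 0 == PySem.List.pyGetD t i 0)).filter
                (fun j => decide (i < j))).map (fun j => (i, j))) := by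
    intro s i
    rw [pvPositionsGetD]
    have := pvFoldlAddIf (((PySem.List.pyRange 0 (t.length : Int) 1).filter
        (fun j => PySem.List.pyGetD t j 0 == PySem.List.pyGetD t i 0)))
      (fun j => decide (i < j)) (fun j => (i, j)) s
    simpa using this
  -- the two per-index pair lists
  set GA : Int → List (Int × Int) := fun i =>
    ((PySem.List.pyRange (i + 1) (t.length : Int) 1).filter
      (fun j => PySem.List.pyGetD t i 0 == PySem.List.pyGetD t j 0)).map (fun j => (i, j)) with hGA
  set GB : Int → List (Int × Int) := fun i =>
    (((PySem.List.pyRange 0 (t.length : Int) 1).filter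
        (fun j => PySem.List.pyGetD t j 0 == PySem.List.pyGetD t i 0)).filter
          (fun j => decide (i < j))).map (fun j => (i, j)) with hGB
  have hfstA : ∀ i, ∀ x ∈ GA i, x.1 = i := by
    intro i x hx; obtain ⟨j, _, rfl⟩ := List.mem_map.mp hx; rfl
  have hfstB : ∀ i, ∀ x ∈ GB i, x.1 = i := by
    intro i x hx; obtain ⟨j, _, rfl⟩ := List.mem_map.mp hx; rfl
  have hndA : ∀ i, (GA i).Nodup := by
    intro i
    exact (((PySem.List.nodup_pyRange_one _ _).filter _).map
      (fun a b h => by simpa using h))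
  have hndB : ∀ i, (GB i).Nodup := by
    intro i
    exact ((((PySem.List.nodup_pyRange_one _ _).filter _).filter _).map
      (fun a b h => by simpa using h))
  have hnodup : (PySem.List.pyRange 0 (t.length : Int) 1).Nodup :=
    PySem.List.nodup_pyRange_one _ _
  have eA := pvFoldlUpdateFresh GA hfstA hndA _ hnodup PySem.Set.empty (by simp [PySem.Set.empty])
  have eB := pvFoldlUpdateFresh GB hfstB hndB _ hnodup PySem.Set.empty (by simp [PySem.Set.empty])
  calc (PySem.List.pyRange 0 (t.length : Int) 1).foldl (fun eqs i =>
          (PySem.List.pyRange (i + 1) (t.length : Int) 1).foldl (fun eqs j =>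
            if PySem.List.pyGetD t i 0 == PySem.List.pyGetD t j 0
            then PySem.Set.add eqs (i, j) else eqs) eqs) PySem.Set.empty
      = (PySem.List.pyRange 0 (t.length : Int) 1).foldl
          (fun s i => PySem.Set.update s (GA i)) PySem.Set.empty := by
        exact PySem.List.foldl_congr_mem _ _ _ _ (fun s i _ => hA s i)
    _ = PySem.Set.empty ++ (PySem.List.pyRange 0 (t.length : Int) 1).flatMap GA := eA
    _ = PySem.Set.empty ++ (PySem.List.pyRange 0 (t.length : Int) 1).flatMap GB := by
        congr 1
        apply List.flatMap_congr
        intro i hi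
        have hm := PySem.List.mem_pyRange_one.mp hi
        simp only [hGA, hGB]
        rw [pvInnerEq t i hm.1 hm.2]
    _ = (PySem.List.pyRange 0 (t.length : Int) 1).foldl
          (fun s i => PySem.Set.update s (GB i)) PySem.Set.empty := eB.symm
    _ = _ := by
        exact (PySem.List.foldl_congr_mem _ _ _ _ (fun s i _ => hB s i)).symm
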